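-- pv_equiv track=rewrite | github.com/JBSmith29/DragonsVault.app | backend/core/domains/cards/services/scryfall_set_metadata_service.py | build_set_release_map
-- ===== SOURCE A (Python) =====
-- from typing import Any, Dict, Iterable, List, Optional
--
-- def build_set_release_map(cache: list[dict[str, Any]]) -> dict[str, str]:
--     releases: dict[str, str] = {}
--     for card in cache:
--         set_code = (card.get("set") or "").lower()
--         released_at = card.get("released_at")
--         if not set_code or not released_at:
--             continue
--         if set_code not in releases or released_at < releases[set_code]:
--             releases[set_code] = released_at
--     return releases
-- ===== SOURCE B (Python) =====
-- def build_set_release_map(cache):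
--     # Two-phase: extract/filter valid (code, date) pairs, group dates per code,
--     # then take min per group -- instead of a running-minimum dict maintained inline.
--     pairs = [((card.get("set") or "").lower(), card.get("released_at") or "") for card in cache]
--     valid = [(c, r) for c, r in pairs if c and r]
--     groups = {}
--     for c, r in valid:
--         groups.setdefault(c, []).append(r)
--     return {c: min(rs) for c, rs in groups.items()}
-- ===== Notes on version B (the rewrite author's own statement) =====
-- stated objective: alternative
-- what changed: B separates the work into map/filter to valid (code, date) pairs, a grouping pass collecting all dates per set code, and a final min-per-group reduction, instead of A's single loop maintaining a running minimum in the result dict.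
import Mathlib
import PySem

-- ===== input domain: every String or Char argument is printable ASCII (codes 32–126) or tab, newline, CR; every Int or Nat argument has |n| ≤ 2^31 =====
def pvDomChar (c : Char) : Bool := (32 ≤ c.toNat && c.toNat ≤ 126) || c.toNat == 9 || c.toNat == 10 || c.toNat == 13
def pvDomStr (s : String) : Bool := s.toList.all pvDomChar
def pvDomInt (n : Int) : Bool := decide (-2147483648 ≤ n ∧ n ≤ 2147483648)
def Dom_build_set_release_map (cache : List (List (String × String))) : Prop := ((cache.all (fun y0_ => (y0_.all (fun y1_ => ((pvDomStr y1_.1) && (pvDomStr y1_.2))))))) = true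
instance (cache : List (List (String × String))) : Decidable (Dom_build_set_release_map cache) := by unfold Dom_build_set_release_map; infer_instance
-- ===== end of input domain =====

-- B replaces A's single loop with a running-minimum dict by three phases (map/filter to valid
-- (code, date) pairs, group dates per code, min per group); equal return value, no speed claim.

-- ===== PORT A =====
def build_set_release_map (cache : List (List (String × String))) : List (String × String) :=
  (cache.foldl (fun releases card =>
      let set_code := PySem.Str.lower (((PySem.Dict.mk card).get? "set").getD "")
      match (PySem.Dict.mk card).get? "released_at" with
      | none => releases   -- 'not released_at' (key absent)
      | some released_at =>
        if set_code = "" ∨ released_at = "" then releases   -- 'if not set_code or not released_at: continue'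
        else
          match releases.get? set_code with   -- 'set_code not in releases or released_at < releases[set_code]'
          | none => releases.insert set_code released_at
          | some cur =>
            if released_at < cur then releases.insert set_code released_at else releases)
    PySem.Dict.empty).items

-- ===== PORT B =====
def build_set_release_map_alt (cache : List (List (String × String))) : List (String × String) :=
  let pairs := cache.map (fun card =>
      (PySem.Str.lower (((PySem.Dict.mk card).get? "set").getD ""),
       ((PySem.Dict.mk card).get? "released_at").getD ""))
  let valid := pairs.filter (fun p => p.1 != "" && p.2 != "")
  let groups := valid.foldl (fun d p => d.modify p.1 [] (fun x => x ++ [p.2])) PySem.Dict.empty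
  -- '{c: min(rs) for c, rs in groups.items()}'; the getD "" default is unreachable (group lists are nonempty)
  (groups.items.foldl (fun d p => d.insert p.1 ((PySem.List.min? p.2 (fun y => y)).getD "")) PySem.Dict.empty).items

-- ===== PRECONDITION & SPEC =====
def Spec_build_set_release_map (cache : List (List (String × String))) (out : List (String × String)) : Prop := out = build_set_release_map_alt cache
instance (cache : List (List (String × String))) (out : List (String × String)) : Decidable (Spec_build_set_release_map cache out) := by unfold Spec_build_set_release_map; infer_instance

-- ===== CLAIM (what is proved, stated in full; the proofs are below) =====
def Claim_equal_build_set_release_map : Prop := ∀ (cache : List (List (String × String))), Dom_build_set_release_map cache → Spec_build_set_release_map cache (build_set_release_map cache)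

-- ===== LEMMAS AND PROOFS =====

-- A's running-min update, on an already-extracted (code, date) pair
def pvStepA (d : PySem.Dict String String) (p : String × String) : PySem.Dict String String :=
  match d.get? p.1 with
  | none => d.insert p.1 p.2
  | some cur => if p.2 < cur then d.insert p.1 p.2 else d

def pvPair (card : List (String × String)) : String × String :=
  (PySem.Str.lower (((PySem.Dict.mk card).get? "set").getD ""),
   ((PySem.Dict.mk card).get? "released_at").getD "")

def pvValid (cache : List (List (String × String))) : List (String × String) :=
  (cache.map pvPair).filter (fun p => p.1 != "" && p.2 != "")

def pvMinStr (l : List String) : String := (PySem.List.min? l (fun y => y)).getD ""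

def pvOcc (l : List (String × String)) (c : String) : List String :=
  (l.filter (fun p => p.1 == c)).map (fun p => p.2)

def pvCanon (l : List (String × String)) : List (String × String) :=
  (PySem.List.dedup (l.map (fun p => p.1))).map (fun c => (c, pvMinStr (pvOcc l c)))

lemma pvBody_eq (d : PySem.Dict String String) (card : List (String × String)) :
    (let set_code := PySem.Str.lower (((PySem.Dict.mk card).get? "set").getD "")
     match (PySem.Dict.mk card).get? "released_at" with
     | none => d
     | some released_at =>
       if set_code = "" ∨ released_at = "" then d
       else
         match d.get? set_code with
         | none => d.insert set_code released_at
         | some cur =>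
           if released_at < cur then d.insert set_code released_at else d)
    = if ((pvPair card).1 != "" && (pvPair card).2 != "") = true then pvStepA d (pvPair card) else d := by
  unfold pvPair pvStepA
  cases hrel : (PySem.Dict.mk card).get? "released_at" with
  | none => simp
  | some r =>
    simp only [Option.getD_some]
    by_cases hk : PySem.Str.lower (((PySem.Dict.mk card).get? "set").getD "") = "" <;>
      by_cases hr : r = "" <;>
      simp [hk, hr]

lemma pvFoldA_eq (cache : List (List (String × String))) :
    ∀ d : PySem.Dict String String,
    cache.foldl (fun releases card =>
      let set_code := PySem.Str.lower (((PySem.Dict.mk card).get? "set").getD "")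
      match (PySem.Dict.mk card).get? "released_at" with
      | none => releases
      | some released_at =>
        if set_code = "" ∨ released_at = "" then releases
        else
          match releases.get? set_code with
          | none => releases.insert set_code released_at
          | some cur =>
            if released_at < cur then releases.insert set_code released_at else releases) d
    = (pvValid cache).foldl pvStepA d := by
  induction cache with
  | nil => intro d; rfl
  | cons card rest ih =>
    intro d
    rw [List.foldl_cons, pvBody_eq]
    show _ = (((card :: rest).map pvPair).filter (fun p => p.1 != "" && p.2 != "")).foldl pvStepA d
    rw [List.map_cons, List.filter_cons]
    by_cases hc : ((pvPair card).1 != "" && (pvPair card).2 != "") = true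
    · rw [if_pos hc, if_pos hc, List.foldl_cons, ih]; rfl
    · rw [if_neg hc, if_neg hc, ih]; rfl

lemma pvGet?_mk_map (K : List String) (g : String → String) (c : String) :
    (PySem.Dict.mk (K.map (fun k => (k, g k)))).get? c = if c ∈ K then some (g c) else none := by
  induction K with
  | nil => simp [PySem.Dict.get?]
  | cons k t ih =>
    simp only [List.map_cons, PySem.Dict.get?_mk_cons, List.mem_cons]
    by_cases h : k = c
    · subst h; simp
    · simp [h, ih, beq_iff_eq, Ne.symm h]

lemma pvDedup_append_singleton (xs : List String) (c : String) :
    PySem.List.dedup (xs ++ [c]) = if c ∈ xs then PySem.List.dedup xs else PySem.List.dedup xs ++ [c] := by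
  simp only [PySem.List.dedup_eq_ofList, PySem.Set.ofList_append]
  rw [show PySem.Set.update (PySem.Set.ofList xs) [c] = PySem.Set.add (PySem.Set.ofList xs) c from rfl]
  by_cases h : c ∈ xs
  · simp [PySem.Set.add, PySem.Set.mem_ofList, h]
  · simp [PySem.Set.add, PySem.Set.mem_ofList, h]

lemma pvOcc_append_singleton (l : List (String × String)) (p : String × String) (k : String) :
    pvOcc (l ++ [p]) k = if p.1 = k then pvOcc l k ++ [p.2] else pvOcc l k := by
  unfold pvOcc
  by_cases h : p.1 = k <;> simp [List.filter_append, h]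

lemma pvOcc_eq_nil (l : List (String × String)) (c : String) (h : c ∉ l.map (fun p => p.1)) :
    pvOcc l c = [] := by
  unfold pvOcc
  rw [List.filter_eq_nil_iff.2, List.map_nil]
  intro p hp hbeq
  exact h (List.mem_map.2 ⟨p, hp, (beq_iff_eq.1 hbeq)⟩)

lemma pvOcc_ne_nil (l : List (String × String)) (c : String) (h : c ∈ l.map (fun p => p.1)) :
    pvOcc l c ≠ [] := by
  unfold pvOcc
  obtain ⟨p, hp, hpc⟩ := List.mem_map.1 h
  simp only [ne_eq, List.map_eq_nil_iff, List.filter_eq_nil_iff]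
  intro hf
  exact hf p hp (by simp [hpc])

lemma pvMinStr_append (l : List String) (r : String) (h : l ≠ []) :
    pvMinStr (l ++ [r]) = if r < pvMinStr l then r else pvMinStr l := by
  obtain ⟨x, t, rfl⟩ := List.exists_cons_of_ne_nil h
  show pvMinStr (x :: (t ++ [r])) = _
  unfold pvMinStr
  rw [PySem.List.min?_id_cons, PySem.List.min?_id_cons]
  simp only [Option.getD_some, List.foldl_append, List.foldl_cons, List.foldl_nil]
  rcases lt_or_ge r (t.foldl min x) with h' | h'
  · simp [h', min_eq_right (le_of_lt h')]
  · simp [not_lt.2 h', min_eq_left h']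

lemma pvFoldA_canon (l : List (String × String)) :
    l.foldl pvStepA PySem.Dict.empty = PySem.Dict.mk (pvCanon l) := by
  induction l using List.reverseRecOn with
  | nil => rfl
  | append_singleton l' p ih =>
    rw [List.foldl_append, List.foldl_cons, List.foldl_nil, ih]
    unfold pvCanon
    set K := l'.map (fun p => p.1) with hK
    have hget := pvGet?_mk_map (PySem.List.dedup K) (fun c => pvMinStr (pvOcc l' c)) p.1
    have hmapkeys : (l' ++ [p]).map (fun p => p.1) = K ++ [p.1] := by simp [hK]
    rw [hmapkeys, pvDedup_append_singleton]
    have hocc : ∀ k, pvOcc (l' ++ [p]) k = if p.1 = k then pvOcc l' k ++ [p.2] else pvOcc l' k :=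
      fun k => pvOcc_append_singleton l' p k
    by_cases hmem : p.1 ∈ K
    · -- key already present: running-min update
      rw [if_pos hmem]
      have hget' : (PySem.Dict.mk (List.map (fun c => (c, pvMinStr (pvOcc l' c))) (PySem.List.dedup K))).get? p.1
          = some (pvMinStr (pvOcc l' p.1)) := by
        rw [hget, if_pos (by rw [PySem.List.mem_dedup]; exact hmem)]
      show pvStepA _ p = _
      unfold pvStepA
      rw [hget']
      dsimp only
      have hnonempty : pvOcc l' p.1 ≠ [] := pvOcc_ne_nil l' p.1 hmem
      by_cases hlt : p.2 < pvMinStr (pvOcc l' p.1)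
      · rw [if_pos hlt]
        have hcont : (PySem.Dict.mk (List.map (fun c => (c, pvMinStr (pvOcc l' c))) (PySem.List.dedup K))).contains p.1 = true := by
          rw [← Bool.not_eq_false, ← PySem.Dict.get?_eq_none_iff_contains, hget']
          simp
        apply PySem.Dict.ext
        rw [PySem.Dict.items_insert_of_contains _ _ hcont]
        show List.map _ (List.map (fun c => (c, pvMinStr (pvOcc l' c))) (PySem.List.dedup K)) = _
        rw [List.map_map]
        apply List.map_congr_left
        intro k hk
        by_cases hkc : k = p.1
        · subst hkc
          simp only [Function.comp, beq_self_eq_true, if_true]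
          rw [hocc p.1, if_pos rfl, pvMinStr_append _ _ hnonempty, if_pos hlt]
        · simp only [Function.comp]
          rw [if_neg (by simp [hkc]), hocc k, if_neg (fun h => hkc h.symm)]
      · rw [if_neg hlt]
        apply PySem.Dict.ext
        show List.map (fun c => (c, pvMinStr (pvOcc l' c))) (PySem.List.dedup K) = _
        apply List.map_congr_left
        intro k hk
        by_cases hkc : k = p.1
        · subst hkc
          rw [hocc p.1, if_pos rfl, pvMinStr_append _ _ hnonempty, if_neg hlt]
        · rw [hocc k, if_neg (fun h => hkc h.symm)]
    · -- fresh key: append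
      rw [if_neg hmem]
      have hget' : (PySem.Dict.mk (List.map (fun c => (c, pvMinStr (pvOcc l' c))) (PySem.List.dedup K))).get? p.1 = none := by
        rw [hget, if_neg (by rw [PySem.List.mem_dedup]; exact hmem)]
      show pvStepA _ p = _
      unfold pvStepA
      rw [hget']
      dsimp only
      have hcont : (PySem.Dict.mk (List.map (fun c => (c, pvMinStr (pvOcc l' c))) (PySem.List.dedup K))).contains p.1 = false :=
        (PySem.Dict.get?_eq_none_iff_contains _ _).1 hget'
      apply PySem.Dict.ext
      rw [PySem.Dict.items_insert_of_not_contains _ _ hcont]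
      show List.map (fun c => (c, pvMinStr (pvOcc l' c))) (PySem.List.dedup K) ++ [(p.1, p.2)] = _
      rw [List.map_append]
      congr 1
      · apply List.map_congr_left
        intro k hk
        rw [hocc k, if_neg]
        intro h
        exact hmem (h ▸ ((PySem.List.mem_dedup _ _).1 hk))
      · simp only [List.map_cons, List.map_nil]
        rw [hocc p.1, if_pos rfl, pvOcc_eq_nil l' p.1 hmem]
        show [(p.1, p.2)] = [(p.1, pvMinStr [p.2])]
        have h1 : pvMinStr [p.2] = p.2 := by
          unfold pvMinStr
          rw [show ([p.2] : List String) = p.2 :: [] from rfl, PySem.List.min?_id_cons]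
          rfl
        rw [h1]

lemma pvAlt_canon (cache : List (List (String × String))) :
    build_set_release_map_alt cache = pvCanon (pvValid cache) := by
  show ((((pvValid cache).foldl (fun d p => d.modify p.1 [] (fun x => x ++ [p.2])) PySem.Dict.empty).items.foldl
      (fun d p => d.insert p.1 ((PySem.List.min? p.2 (fun y => y)).getD "")) PySem.Dict.empty).items) = _
  set valid := pvValid cache with hv
  set groups := valid.foldl (fun d p => d.modify p.1 [] (fun x => x ++ [p.2])) PySem.Dict.empty with hg
  have hkeys : groups.keys = PySem.List.dedup (valid.map (fun p => p.1)) := by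
    rw [hg]
    rw [show (fun (d : PySem.Dict String (List String)) (p : String × String) => d.modify p.1 [] (fun x => x ++ [p.2]))
        = (fun d p => d.modify ((fun q : String × String => q.1) p) [] ((fun (_ : PySem.Dict String (List String)) (q : String × String) (x : List String) => x ++ [q.2]) d p)) from rfl]
    rw [PySem.Dict.keys_foldl_modify_key]
    simp only [PySem.List.dedup_eq_ofList, PySem.Dict.keys]
    rw [show (PySem.Dict.empty : PySem.Dict String (List String)).items.map (fun x => x.1) = ([] : List String) from rfl]
    exact PySem.Set.update_nil_left _
  have hnodup : groups.keys.Nodup := by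
    rw [hkeys]; exact PySem.List.nodup_dedup _
  have hgetD : ∀ c, groups.getD c [] = pvOcc valid c := by
    intro c
    rw [hg, PySem.Dict.getD_foldl_modify_append]
    simp [pvOcc, PySem.Dict.getD_empty]
  have hitems : groups.items = (PySem.List.dedup (valid.map (fun p => p.1))).map (fun c => (c, pvOcc valid c)) := by
    rw [PySem.Dict.items_eq_map_keys groups hnodup [], hkeys]
    apply List.map_congr_left
    intro k _
    rw [hgetD k]
  have hfresh : ∀ p ∈ groups.items, (PySem.Dict.empty : PySem.Dict String String).contains p.1 = false := by
    intro p _; exact PySem.Dict.contains_empty _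
  have hnd2 : (groups.items.map (fun p => p.1)).Nodup := hnodup
  rw [PySem.Dict.items_foldl_insert_fresh groups.items (fun p => p.1) (fun p => (PySem.List.min? p.2 (fun y => y)).getD "") PySem.Dict.empty hfresh hnd2]
  rw [hitems]
  simp only [List.map_map]
  rfl

-- ===== VERDICT (by name: the statement is the Claim_ definition above) =====
theorem build_set_release_map_spec : Claim_equal_build_set_release_map := by
  intro cache _
  show build_set_release_map cache = build_set_release_map_alt cache
  rw [build_set_release_map, pvFoldA_eq, pvFoldA_canon, pvAlt_canon]
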